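-- pv_equiv track=rewrite | github.com/Riyajude/dsa-practice | minmaxsum.py | minmaxsum
-- ===== SOURCE A (Python) =====
-- def minmaxsum(arr):
--     l=len(arr)
--     min=arr[0]
--     max=arr[0]
--     for i in range(l):
--         if arr[i]<min:
--             min=arr[i]
--
--     for j in range(l):
--         if arr[j]>max:
--             max=arr[j]
--
--     sum=max+min
--     return sum,min,max
-- ===== SOURCE B (Python) =====
-- def minmaxsum(arr):
--     lo = hi = arr[0]
--     for x in arr:
--         if x < lo:
--             lo = x
--         if x > hi:
--             hi = x
--     return lo + hi, lo, hi
-- ===== Notes on version B (the rewrite author's own statement) =====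
-- stated objective: simpler
-- what changed: Single pass over the elements maintaining both extrema at once, instead of two separate index-based scans.
import Mathlib
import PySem

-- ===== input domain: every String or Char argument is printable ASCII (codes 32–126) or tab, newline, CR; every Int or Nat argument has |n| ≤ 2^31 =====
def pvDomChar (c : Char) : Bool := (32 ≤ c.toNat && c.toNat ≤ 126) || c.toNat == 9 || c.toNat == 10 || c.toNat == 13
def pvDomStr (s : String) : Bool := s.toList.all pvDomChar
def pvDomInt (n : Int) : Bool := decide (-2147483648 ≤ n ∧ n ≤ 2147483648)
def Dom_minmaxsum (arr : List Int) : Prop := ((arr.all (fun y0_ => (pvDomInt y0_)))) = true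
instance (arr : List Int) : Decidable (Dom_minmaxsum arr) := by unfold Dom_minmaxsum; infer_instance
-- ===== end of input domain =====

-- B replaces A's two separate index scans by a single pass over the elements maintaining
-- both extrema at once (objective: simpler). A raises IndexError on the empty list (Pre_).


-- ===== PORT A =====
-- A: min := arr[0]; one index loop lowering min; a second index loop raising max; return (max+min, min, max).
def minmaxsum (arr : List Int) : Int × Int × Int :=
  match arr with
  | [] => (0, 0, 0)  -- unreachable: Python A raises IndexError on [], excluded by Pre_
  | a :: _ =>
    let l : Int := arr.length
    let mn := (PySem.List.pyRange 0 l 1).foldl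
      (fun m i => if PySem.List.pyGetD arr i 0 < m then PySem.List.pyGetD arr i 0 else m) a
    let mx := (PySem.List.pyRange 0 l 1).foldl
      (fun m j => if PySem.List.pyGetD arr j 0 > m then PySem.List.pyGetD arr j 0 else m) a
    (mx + mn, mn, mx)

-- ===== PORT B =====
-- B: lo = hi = arr[0]; one pass over the elements updating both; return (lo+hi, lo, hi).
def minmaxsum_alt (arr : List Int) : Int × Int × Int :=
  match arr with
  | [] => (0, 0, 0)  -- unreachable: B's arr[0] raises IndexError on [], excluded by Pre_
  | a :: _ =>
    let p := arr.foldl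
      (fun (p : Int × Int) x =>
        (if x < p.1 then x else p.1, if x > p.2 then x else p.2)) (a, a)
    (p.1 + p.2, p.1, p.2)

-- ===== PRECONDITION & SPEC =====
-- A (and B) raise IndexError on the empty list: excluded.
def Pre_minmaxsum (arr : List Int) : Prop := arr ≠ []
instance (arr : List Int) : Decidable (Pre_minmaxsum arr) := by unfold Pre_minmaxsum; infer_instance
def pvWitness_minmaxsum : List Int := [3, -1, 4]
def Spec_minmaxsum (arr : List Int) (out : Int × Int × Int) : Prop := out = minmaxsum_alt arr
instance (arr : List Int) (out : Int × Int × Int) : Decidable (Spec_minmaxsum arr out) := by unfold Spec_minmaxsum; infer_instance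

-- ===== CLAIM (what is proved, stated in full; the proofs are below) =====
def Claim_equal_minmaxsum : Prop := ∀ (arr : List Int), Dom_minmaxsum arr → Pre_minmaxsum arr → Spec_minmaxsum arr (minmaxsum arr)

-- ===== LEMMAS AND PROOFS =====

-- B's paired fold is the pair of the two component folds.
theorem pair_foldl (xs : List Int) (lo hi : Int) :
    xs.foldl (fun (p : Int × Int) x =>
        (if x < p.1 then x else p.1, if x > p.2 then x else p.2)) (lo, hi)
      = (xs.foldl (fun m x => if x < m then x else m) lo,
         xs.foldl (fun m x => if x > m then x else m) hi) := by
  induction xs generalizing lo hi with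
  | nil => rfl
  | cons y ys ih => simp [List.foldl, ih]

-- ===== VERDICT (by name: the statement is the Claim_ definition above) =====
theorem minmaxsum_spec : Claim_equal_minmaxsum := by
  intro arr _ hpre
  unfold Spec_minmaxsum
  match arr with
  | [] => exact absurd rfl hpre
  | a :: t =>
    show minmaxsum (a :: t) = minmaxsum_alt (a :: t)
    simp only [minmaxsum, minmaxsum_alt, pair_foldl]
    rw [PySem.List.foldl_pyRange_zero_pyGetD' (a :: t) 0
          (fun m v => if v < m then v else m) a,
        PySem.List.foldl_pyRange_zero_pyGetD' (a :: t) 0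
          (fun m v => if v > m then v else m) a,
        Int.add_comm]
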